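-- pv_equiv track=rewrite | github.com/ajay333a/cs_50_ajay | wk_6_python/probset_6/sentimental-credit/credit.py | prdt_add
-- ===== SOURCE A (Python) =====
-- def prdt_add(lst_dgt):  # getting sum of product of numbers
--     pd_2 = lst_dgt * 2
--     pd_sum = 0
--     while pd_2 > 0:
--         lst_sum = pd_2 % 10
--         pd_sum += lst_sum
--         pd_2 //= 10
--     return pd_sum
-- ===== SOURCE B (Python) =====
-- def prdt_add(lst_dgt):  # getting sum of product of numbers
--     d = lst_dgt * 2
--     if d <= 0:
--         return 0
--     return sum(int(c) for c in str(d))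
-- ===== Notes on version B (the rewrite author's own statement) =====
-- stated objective: idiomatic
-- what changed: B sums the digits by iterating over the characters of the decimal string of the doubled input instead of peeling digits with an arithmetic remainder/quotient while-loop.
import Mathlib
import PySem

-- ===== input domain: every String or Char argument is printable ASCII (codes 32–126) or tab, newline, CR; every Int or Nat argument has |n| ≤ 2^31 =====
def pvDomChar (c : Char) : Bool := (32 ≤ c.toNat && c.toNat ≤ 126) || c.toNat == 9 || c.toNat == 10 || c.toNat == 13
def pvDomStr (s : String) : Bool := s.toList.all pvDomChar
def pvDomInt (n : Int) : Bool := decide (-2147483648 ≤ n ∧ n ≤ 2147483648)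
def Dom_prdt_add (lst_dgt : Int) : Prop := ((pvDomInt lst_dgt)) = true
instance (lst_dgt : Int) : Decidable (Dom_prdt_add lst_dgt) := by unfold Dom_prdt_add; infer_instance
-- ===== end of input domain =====

-- B sums the digits of str(2*n) by character traversal instead of A's %10 // 10 loop; same values everywhere.

-- ===== PORT A =====
-- the while-loop of A: state (pd_2, pd_sum); runs while pd_2 > 0
def prdtLoop (pd2 pdsum : Int) : Int :=
  if 0 < pd2 then
    prdtLoop (PySem.Int.floordiv pd2 10) (pdsum + PySem.Int.mod pd2 10)
  else pdsum
termination_by pd2.toNat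
decreasing_by
  simp only [PySem.Int.floordiv]
  have h10 : pd2.fdiv 10 = pd2 / 10 := by
    rw [Int.fdiv_eq_ediv]; simp
  omega

def prdt_add (lst_dgt : Int) : Int :=
  let pd_2 := lst_dgt * 2
  prdtLoop pd_2 0

-- ===== PORT B =====
-- int(c) on a single character; Python raises on non-digits, which never occurs here
def pvCharInt (c : Char) : Int := (PySem.Int.ofChars? [c]).getD 0

def prdt_add_alt (lst_dgt : Int) : Int :=
  let d := lst_dgt * 2
  if d ≤ 0 then 0
  else ((PySem.Int.toStr d).toList.map pvCharInt).sum

-- ===== PRECONDITION & SPEC =====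
def Spec_prdt_add (lst_dgt : Int) (out : Int) : Prop := out = prdt_add_alt lst_dgt
instance (lst_dgt : Int) (out : Int) : Decidable (Spec_prdt_add lst_dgt out) := by unfold Spec_prdt_add; infer_instance

-- ===== CLAIM (what is proved, stated in full; the proofs are below) =====
def Claim_equal_prdt_add : Prop := ∀ (lst_dgt : Int), Dom_prdt_add lst_dgt → Spec_prdt_add lst_dgt (prdt_add lst_dgt)

-- ===== LEMMAS AND PROOFS =====

-- arithmetic digit sum of a natural number (the common value of both ports)
def digsum (n : Nat) : Int :=
  if n = 0 then 0 else (n % 10 : Nat) + digsum (n / 10)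
decreasing_by exact Nat.div_lt_self (by omega) (by omega)

lemma digsum_step (n : Nat) (h : n ≠ 0) : digsum n = (n % 10 : Nat) + digsum (n / 10) := by
  rw [digsum]; simp [h]

lemma prdtLoop_eq (pd2 s : Int) : prdtLoop pd2 s = s + digsum pd2.toNat := by
  induction pd2, s using prdtLoop.induct with
  | case1 pd2 s h ih =>
    rw [prdtLoop]
    rw [if_pos h, ih]
    have hfd : PySem.Int.floordiv pd2 10 = pd2 / 10 := by
      simp only [PySem.Int.floordiv]; rw [Int.fdiv_eq_ediv]; simp
    have hfm : PySem.Int.mod pd2 10 = pd2 % 10 := by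
      simp only [PySem.Int.mod]; rw [Int.fmod_eq_emod]; simp
    rw [hfd, hfm, digsum_step pd2.toNat (by omega)]
    have e1 : (pd2 / 10).toNat = pd2.toNat / 10 := by omega
    have e2 : pd2 % 10 = ((pd2.toNat % 10 : Nat) : Int) := by omega
    rw [e1, e2]; ring
  | case2 pd2 s h =>
    rw [prdtLoop, if_neg h]
    rw [show pd2.toNat = 0 by omega, digsum]
    simp

lemma digitChar_val {m : Nat} (h : m < 10) : pvCharInt (Nat.digitChar m) = (m : Int) := by
  interval_cases m <;> decide

lemma toDigits_sum (n : Nat) :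
    ((Nat.toDigits 10 n).map pvCharInt).sum = digsum n := by
  induction n using Nat.strong_induction_on with
  | _ n ih =>
    rw [Nat.toDigits_eq_if (by omega)]
    by_cases h : n < 10
    · rw [if_pos h]
      simp only [List.map_cons, List.map_nil, List.sum_cons, List.sum_nil, add_zero,
        digitChar_val h]
      by_cases h0 : n = 0
      · subst h0; rw [digsum]; simp
      · rw [digsum_step n h0, Nat.mod_eq_of_lt h, Nat.div_eq_of_lt h, digsum]; simp
    · simp only [h, if_false]
      rw [List.map_append, List.sum_append]
      rw [ih (n / 10) (Nat.div_lt_self (by omega) (by omega))]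
      simp only [List.map_cons, List.map_nil, List.sum_cons, List.sum_nil,
        digitChar_val (Nat.mod_lt n (by omega)), add_zero]
      rw [digsum_step n (by omega)]
      ring

-- ===== VERDICT (by name: the statement is the Claim_ definition above) =====
theorem prdt_add_spec : Claim_equal_prdt_add := by
  intro n _
  unfold Spec_prdt_add prdt_add prdt_add_alt
  simp only []
  rw [prdtLoop_eq]
  by_cases h : n * 2 ≤ 0
  · simp [h, show (n*2).toNat = 0 by omega, digsum]
  · simp only [h, if_false]
    rw [PySem.Int.toList_toStr]
    unfold PySem.Int.toChars
    rw [if_neg (by omega)]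
    rw [toDigits_sum]
    ring
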